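-- pv_equiv track=rewrite | github.com/pgrynfelder/algorithmics | oi/pis/new.py | depunctuate
-- ===== SOURCE A (Python) =====
-- def depunctuate(text):
--     result = []
--     for word in text.split():
--         newword = ""
--         for letter in word:
--             if letter.isalpha():
--                 newword += letter
--         if newword: result.append(newword)
--     return result
-- ===== SOURCE B (Python) =====
-- def depunctuate(text):
--     cleaned = "".join(c for c in text if c.isalpha() or c.isspace())
--     return cleaned.split()
-- ===== Notes on version B (the rewrite author's own statement) =====
-- stated objective: simpler
-- what changed: Instead of splitting first and then filtering letters inside each word (skipping words that filter to empty), B strips every non-letter, non-whitespace character from the whole text in one pass and lets a single split() recover the words.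
import Mathlib
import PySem

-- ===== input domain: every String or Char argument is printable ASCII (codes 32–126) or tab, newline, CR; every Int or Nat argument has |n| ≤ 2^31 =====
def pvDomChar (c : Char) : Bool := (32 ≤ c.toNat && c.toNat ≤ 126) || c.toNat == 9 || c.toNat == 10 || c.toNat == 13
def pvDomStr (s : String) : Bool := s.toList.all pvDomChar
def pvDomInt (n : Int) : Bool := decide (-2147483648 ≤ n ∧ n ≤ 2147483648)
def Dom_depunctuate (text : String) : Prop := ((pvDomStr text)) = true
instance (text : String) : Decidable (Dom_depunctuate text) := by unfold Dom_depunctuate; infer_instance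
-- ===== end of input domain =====

-- B strips every non-letter, non-whitespace character from the whole text in one
-- pass and then splits once, instead of A's split-then-filter-each-word; simpler, same cost.

-- ===== PORT A =====
-- for word in text.split(): build newword from the alphabetic letters of word; append if nonempty
def depunctuate (text : String) : List String :=
  (PySem.Str.split₀ text).foldl
    (fun result word =>
      let newword :=
        word.toList.foldl
          (fun nw letter => if PySem.Chars.isalpha letter then nw.push letter else nw) ""
      if newword ≠ "" then result ++ [newword] else result)
    []

-- ===== PORT B =====
-- cleaned = "".join(c for c in text if c.isalpha() or c.isspace()); return cleaned.split()
def depunctuate_alt (text : String) : List String :=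
  PySem.Str.split₀
    (String.ofList (text.toList.filter (fun c => PySem.Chars.isalpha c || PySem.Chars.isspace c)))

-- ===== PRECONDITION & SPEC =====
def Spec_depunctuate (text : String) (out : List String) : Prop := out = depunctuate_alt text
instance (text : String) (out : List String) : Decidable (Spec_depunctuate text out) := by unfold Spec_depunctuate; infer_instance

-- ===== CLAIM (what is proved, stated in full; the proofs are below) =====
def Claim_equal_depunctuate : Prop := ∀ (text : String), Dom_depunctuate text → Spec_depunctuate text (depunctuate text)

-- ===== LEMMAS AND PROOFS =====

-- A nonempty string of characters is nonempty under ==.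
theorem pv_ofList_beq (l : List Char) : (String.ofList l == "") = l.isEmpty := by
  cases l <;> simp [String.ext_iff]

-- A's inner loop collects exactly the alphabetic letters of the word.
theorem pv_inner (l : List Char) (nw : String) :
    l.foldl (fun nw letter => if PySem.Chars.isalpha letter = true then nw.push letter else nw) nw
      = nw ++ String.ofList (l.filter PySem.Chars.isalpha) := by
  induction l generalizing nw with
  | nil => simp
  | cons c t ih =>
    by_cases h : PySem.Chars.isalpha c = true <;>
      simp only [List.foldl_cons, h, if_true, if_false, List.filter_cons, ih] <;>
      apply String.ext <;> simp [h]

-- A's outer loop is a map-then-drop-empties over the word list.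
theorem pv_outer (ws : List String) (res : List String) :
    ws.foldl
        (fun result word =>
          let newword :=
            word.toList.foldl
              (fun nw letter => if PySem.Chars.isalpha letter then nw.push letter else nw) ""
          if newword ≠ "" then result ++ [newword] else result)
        res
      = res ++ ((ws.map (fun w => String.ofList (w.toList.filter PySem.Chars.isalpha))).filter
          (fun w => !(w == ""))) := by
  induction ws generalizing res with
  | nil => simp
  | cons w t ih =>
    simp only [List.foldl_cons, List.map_cons, List.filter_cons]
    have hin := pv_inner w.toList ""
    by_cases h : String.ofList (w.toList.filter PySem.Chars.isalpha) = ""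
    · simp only [hin]
      rw [if_neg (by simp [h]), ih]
      simp [h]
    · simp only [hin]
      rw [if_pos (by simp [h]), ih]
      simp [h]

-- Key commutation: deleting the non-letter, non-space characters first and then
-- splitting equals splitting first, keeping the letters of each word, and
-- dropping the words that become empty.
theorem pv_go (cs : List Char) : ∀ (cur : List Char) (acc : List (List Char)),
    PySem.Chars.split₀.go
        (cs.filter (fun c => PySem.Chars.isalpha c || PySem.Chars.isspace c))
        (cur.filter PySem.Chars.isalpha)
        ((acc.map (·.filter PySem.Chars.isalpha)).filter (fun w => !w.isEmpty))
      = ((PySem.Chars.split₀.go cs cur acc).map (·.filter PySem.Chars.isalpha)).filter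
          (fun w => !w.isEmpty) := by
  induction cs with
  | nil =>
    intro cur acc
    by_cases h2 : cur.isEmpty = true
    · have : cur = [] := by simpa [List.isEmpty_iff] using h2
      subst this
      simp [PySem.Chars.split₀.go, List.filter_reverse, List.map_reverse]
    · by_cases h : (cur.filter PySem.Chars.isalpha).isEmpty = true
      · simp_all [PySem.Chars.split₀.go, List.filter_reverse, List.map_reverse, List.filter_cons]
      · simp_all [PySem.Chars.split₀.go, List.filter_reverse, List.map_reverse, List.filter_cons]
  | cons c t ih =>
    intro cur acc
    by_cases hs : PySem.Chars.isspace c = true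
    · have hp : (PySem.Chars.isalpha c || PySem.Chars.isspace c) = true := by simp [hs]
      by_cases h2 : cur.isEmpty = true
      · have : cur = [] := by simpa [List.isEmpty_iff] using h2
        subst this
        simpa [List.filter_cons, hp, PySem.Chars.split₀.go, hs] using ih [] acc
      · by_cases h : (cur.filter PySem.Chars.isalpha).isEmpty = true
        · have hM : ((cur.reverse :: acc).map (·.filter PySem.Chars.isalpha)).filter
              (fun w => !w.isEmpty) = (acc.map (·.filter PySem.Chars.isalpha)).filter
              (fun w => !w.isEmpty) := by
            simp [List.filter_cons, List.filter_reverse, List.isEmpty_iff.mp h]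
          have hIH := ih [] (cur.reverse :: acc)
          rw [hM] at hIH
          simp only [List.filter_nil] at hIH
          rw [List.filter_cons, hp]
          simp only [PySem.Chars.split₀.go, hs, h, h2, if_true, if_false]
          simpa using hIH
        · have hM : ((cur.reverse :: acc).map (·.filter PySem.Chars.isalpha)).filter
              (fun w => !w.isEmpty) = (cur.filter PySem.Chars.isalpha).reverse ::
                (acc.map (·.filter PySem.Chars.isalpha)).filter (fun w => !w.isEmpty) := by
            simp only [List.map_cons, List.filter_cons, List.filter_reverse]
            simp [List.isEmpty_eq_false_iff.mpr, h]
          have hIH := ih [] (cur.reverse :: acc)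
          rw [hM] at hIH
          simp only [List.filter_nil] at hIH
          rw [List.filter_cons, hp]
          simp only [PySem.Chars.split₀.go, hs, h, h2, if_true, if_false]
          simpa using hIH
    · by_cases ha : PySem.Chars.isalpha c = true
      · have hp : (PySem.Chars.isalpha c || PySem.Chars.isspace c) = true := by simp [ha]
        have hIH := ih (c :: cur) acc
        simp only [List.filter_cons, ha, if_true] at hIH
        rw [List.filter_cons, hp]
        simp only [PySem.Chars.split₀.go, hs, ha, if_true, if_false]
        simpa using hIH
      · have hp : (PySem.Chars.isalpha c || PySem.Chars.isspace c) = false := by simp [ha, hs]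
        have hIH := ih (c :: cur) acc
        simp only [List.filter_cons, ha, if_false] at hIH
        rw [List.filter_cons, hp]
        simp only [PySem.Chars.split₀.go, hs, if_true, if_false]
        simpa using hIH

theorem pv_split_eq (cs : List Char) :
    PySem.Chars.split₀ (cs.filter (fun c => PySem.Chars.isalpha c || PySem.Chars.isspace c))
      = ((PySem.Chars.split₀ cs).map (·.filter PySem.Chars.isalpha)).filter
          (fun w => !w.isEmpty) := by
  simpa [PySem.Chars.split₀] using pv_go cs [] []

-- Str.split₀ through the Chars layer.
theorem pv_str_split (s : String) :
    PySem.Str.split₀ s = (PySem.Chars.split₀ s.toList).map String.ofList := by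
  rw [← PySem.Str.split₀_map_toList s, List.map_map]
  simp [Function.comp_def]

-- ===== VERDICT (by name: the statement is the Claim_ definition above) =====
theorem depunctuate_spec : Claim_equal_depunctuate := by
  intro text _
  show depunctuate text = depunctuate_alt text
  rw [depunctuate, depunctuate_alt, pv_outer, pv_str_split, pv_str_split,
    String.toList_ofList, pv_split_eq]
  simp only [List.map_map, List.filter_map, Function.comp_def, String.toList_ofList,
    pv_ofList_beq, List.nil_append]
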